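-- pv_equiv track=rewrite | github.com/Leapense/problems | 8797번: Konkotenacja/solution.py | count_konkotenations
-- ===== SOURCE A (Python) =====
-- from typing import List
--
-- MOD: int = 10 ** 9 + 7
--
-- def count_konkotenations(word: str) -> int:
--     n: int = len(word)
--     separators: List[int] = []
--     for i in range(1, n - 3):
--         if word[i:i+3] == "kot":
--             separators.append(i)
--
--     m: int = len(separators)
--     dp: List[int] = [0] * (m + 1)
--     dp[0] = 1
--
--     left: int = 0
--     for k in range(1, m + 1):
--         dp[k] = dp[k - 1]
--         curr_pos = separators[k - 1]
--         threshold = curr_pos - 4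
--
--         while left < k and separators[left] <= threshold:
--             left += 1
--
--         dp[k] = (dp[k] + dp[left]) % MOD
--
--     return dp[m]
-- ===== SOURCE B (Python) =====
-- MOD: int = 10 ** 9 + 7
--
-- def count_konkotenations(word: str) -> int:
--     # Single pass, O(1) memory: "kot" occurrences are at least 3 apart, so the
--     # number of earlier separators at distance >= 4 is determined by the gap to
--     # the previous separator alone: dp_new = dp + dp  unless the previous
--     # separator sits exactly 3 positions back (overlapping "kotkot"), in which
--     # case dp_new = dp + older.
--     prev_pos = None
--     older, cur = 0, 1
--     for i in range(1, len(word) - 3):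
--         if word[i:i+3] == "kot":
--             if prev_pos is not None and i - prev_pos == 3:
--                 older, cur = cur, (cur + older) % MOD
--             else:
--                 older, cur = cur, (cur + cur) % MOD
--             prev_pos = i
--     return cur
-- ===== Notes on version B (the rewrite author's own statement) =====
-- stated objective: alternative
-- what changed: B drops the separators list, the dp array and any search entirely: it is a single pass over the string keeping only the last two dp values and the previous match position, using the fact that 'kot' occurrences are at least 3 apart, so the dp recurrence reduces to cur+cur, or cur+older when the previous separator is exactly 3 back (overlapping 'kotkot').
import Mathlib
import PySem

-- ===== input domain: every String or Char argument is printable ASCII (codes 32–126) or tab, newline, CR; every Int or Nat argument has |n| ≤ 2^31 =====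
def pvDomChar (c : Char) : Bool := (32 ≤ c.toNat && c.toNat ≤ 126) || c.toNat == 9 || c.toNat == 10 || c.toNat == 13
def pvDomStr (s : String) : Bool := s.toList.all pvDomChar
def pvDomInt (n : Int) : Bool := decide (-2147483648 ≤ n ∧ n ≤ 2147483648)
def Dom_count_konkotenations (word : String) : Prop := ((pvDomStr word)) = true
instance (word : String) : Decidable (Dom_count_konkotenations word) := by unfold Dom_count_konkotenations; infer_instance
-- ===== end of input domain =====

-- B replaces A's separators list + dp array + two-pointer sweep by a single pass over the
-- string keeping only the last two dp values: since "kot" occurrences are at least 3 apart,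
-- the recurrence is cur+cur, or cur+older when the previous separator is exactly 3 back.

-- ===== PORT A =====
def pvMOD : Int := 10 ^ 9 + 7   -- module constant MOD

-- A's inner `while left < k and separators[left] <= threshold: left += 1`
-- (separators[left] is always in range there since left < k ≤ len(separators))
def pvAdvA (s : List Int) (t : Int) (k l : Nat) : Nat :=
  if h : l < k then
    if PySem.List.pyGetD s (l : Int) 0 ≤ t then pvAdvA s t k (l + 1) else l
  else l
termination_by k - l
decreasing_by omega

-- A's loop body for `for k in range(1, m + 1)`; state = (dp, left), k ≥ 1 over the range
def pvAStep (separators : List Int) (st : List Int × Nat) (k : Int) : List Int × Nat :=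
  let kn := k.toNat
  let dp := st.1.set kn (PySem.List.pyGetD st.1 (k - 1) 0)        -- dp[k] = dp[k - 1]
  let currPos := PySem.List.pyGetD separators (k - 1) 0           -- separators[k - 1]
  let threshold := currPos - 4
  let left := pvAdvA separators threshold kn st.2
  (dp.set kn (PySem.Int.mod (PySem.List.pyGetD dp k 0 + PySem.List.pyGetD dp (left : Int) 0) pvMOD),
   left)

def count_konkotenations (word : String) : Int :=
  let cs := word.toList
  let n : Int := cs.length
  let separators : List Int :=
    (PySem.List.pyRange 1 (n - 3) 1).foldl
      (fun acc i =>
        if PySem.List.slice cs (some i) (some (i + 3)) = ['k', 'o', 't'] then acc ++ [i]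
        else acc) []
  let m := separators.length
  let dp : List Int := (List.replicate (m + 1) 0).set 0 1
  let st := (PySem.List.pyRange 1 ((m : Int) + 1) 1).foldl (pvAStep separators) (dp, 0)
  PySem.List.pyGetD st.1 (m : Int) 0                              -- dp[m]

-- ===== PORT B =====
-- B's loop body on a match; state = (prev_pos, older, cur)
def pvBUpd (st : Option Int × Int × Int) (i : Int) : Option Int × Int × Int :=
  match st.1 with
  | some p =>
      if i - p = 3 then (some i, st.2.2, PySem.Int.mod (st.2.2 + st.2.1) pvMOD)
      else (some i, st.2.2, PySem.Int.mod (st.2.2 + st.2.2) pvMOD)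
  | none => (some i, st.2.2, PySem.Int.mod (st.2.2 + st.2.2) pvMOD)

def count_konkotenations_alt (word : String) : Int :=
  let cs := word.toList
  let st := (PySem.List.pyRange 1 ((cs.length : Int) - 3) 1).foldl
    (fun st i =>
      if PySem.List.slice cs (some i) (some (i + 3)) = ['k', 'o', 't'] then pvBUpd st i
      else st)
    (none, 0, 1)
  st.2.2

-- ===== PRECONDITION & SPEC =====
def Spec_count_konkotenations (word : String) (out : Int) : Prop := out = count_konkotenations_alt word
instance (word : String) (out : Int) : Decidable (Spec_count_konkotenations word out) := by unfold Spec_count_konkotenations; infer_instance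

-- ===== CLAIM (what is proved, stated in full; the proofs are below) =====
def Claim_equal_count_konkotenations : Prop := ∀ (word : String), Dom_count_konkotenations word → Spec_count_konkotenations word (count_konkotenations word)

-- ===== LEMMAS AND PROOFS =====

-- a conditional state update folds like a fold over the filtered list
theorem pvFoldlIfFilter {α β : Type} (p : α → Prop) [DecidablePred p] (f : β → α → β)
    (l : List α) (init : β) :
    l.foldl (fun st i => if p i then f st i else st) init
      = (l.filter (fun i => decide (p i))).foldl f init := by
  induction l generalizing init with
  | nil => rfl
  | cons a l ih =>
    by_cases h : p a <;> simp [List.foldl_cons, h, ih]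

-- number of elements ≤ t in the sorted separator list (= A's two-pointer target)
def pvCnt (s : List Int) (t : Int) : Nat := (s.takeWhile (fun x => decide (x ≤ t))).length

-- A's `left` after the first j iterations
def pvLft (S : List Int) (j : Nat) : Nat := if j = 0 then 0 else pvCnt S (S.getD (j - 1) 0 - 4)

-- the common dp sequence, in B's gap-based form
def pvD (S : List Int) : Nat → Int
  | 0 => 1
  | 1 => PySem.Int.mod (1 + 1) pvMOD
  | (j + 2) => PySem.Int.mod (pvD S (j + 1) +
      (if S.getD (j + 1) 0 - S.getD j 0 = 3 then pvD S j else pvD S (j + 1))) pvMOD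

theorem pvD_eq2 (S : List Int) (j : Nat) :
    pvD S (j + 2) = PySem.Int.mod (pvD S (j + 1) +
      (if S.getD (j + 1) 0 - S.getD j 0 = 3 then pvD S j else pvD S (j + 1))) pvMOD := rfl

theorem pvCnt_cons (a : Int) (s : List Int) (t : Int) :
    pvCnt (a :: s) t = if a ≤ t then pvCnt s t + 1 else 0 := by
  simp only [pvCnt, List.takeWhile_cons]
  by_cases h : a ≤ t <;> simp [h]

theorem pvCnt_getD_le (s : List Int) (t : Int) (i : Nat) (h : i < pvCnt s t) :
    s.getD i 0 ≤ t := by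
  induction s generalizing i with
  | nil => simp [pvCnt] at h
  | cons a s ih =>
    rw [pvCnt_cons] at h
    split_ifs at h with ha
    · cases i with
      | zero => simpa using ha
      | succ i => exact ih i (by omega)
    · omega

theorem pvCnt_boundary (s : List Int) (t : Int) (h : pvCnt s t < s.length) :
    ¬ s.getD (pvCnt s t) 0 ≤ t := by
  induction s with
  | nil => simp at h
  | cons a s ih =>
    rw [pvCnt_cons] at h ⊢
    split_ifs at h ⊢ with ha
    · simpa using ih (by simpa using h)
    · simpa using ha

theorem pvCnt_mono (s : List Int) (t t' : Int) (h : t ≤ t') : pvCnt s t ≤ pvCnt s t' := by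
  induction s with
  | nil => simp [pvCnt]
  | cons a s ih =>
    rw [pvCnt_cons, pvCnt_cons]
    split_ifs with h1 h2 <;> omega

theorem pvCnt_iff (S : List Int) (hS : S.Pairwise (· < ·)) (t : Int) (i : Nat)
    (hi : i < S.length) : S.getD i 0 ≤ t ↔ i < pvCnt S t := by
  constructor
  · intro h
    by_contra hc
    push Not at hc
    have hclen : pvCnt S t < S.length := lt_of_le_of_lt hc hi
    have hb := pvCnt_boundary S t hclen
    rcases Nat.eq_or_lt_of_le hc with heq | hlt
    · exact hb (heq ▸ h)
    · rw [List.pairwise_iff_getElem] at hS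
      have := hS (pvCnt S t) i hclen hi hlt
      rw [List.getD_eq_getElem S 0 hclen] at hb
      rw [List.getD_eq_getElem S 0 hi] at h
      omega
  · exact pvCnt_getD_le S t i

theorem pvAdvA_eq (S : List Int) (hS : S.Pairwise (· < ·)) (t : Int) (k l : Nat)
    (hl : l ≤ pvCnt S t) (hc : pvCnt S t ≤ k) (hk : k ≤ S.length) :
    pvAdvA S t k l = pvCnt S t := by
  have key : ∀ (d k l : Nat), k - l ≤ d → l ≤ pvCnt S t → pvCnt S t ≤ k → k ≤ S.length →
      pvAdvA S t k l = pvCnt S t := by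
    intro d
    induction d with
    | zero =>
      intro k l hd hl hc hk
      rw [pvAdvA]
      rw [dif_neg (by omega)]
      omega
    | succ d ih =>
      intro k l hd hl hc hk
      rw [pvAdvA]
      by_cases hlk : l < k
      · rw [dif_pos hlk]
        rw [PySem.List.pyGetD_natCast]
        by_cases hle : S.getD l 0 ≤ t
        · rw [if_pos hle]
          have hlcnt : l < pvCnt S t := (pvCnt_iff S hS t l (by omega)).mp hle
          exact ih k (l + 1) (by omega) (by omega) hc hk
        · rw [if_neg hle]
          have : ¬ l < pvCnt S t := fun hc' => hle (pvCnt_getD_le S t l hc')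
          omega
      · rw [dif_neg hlk]
        omega
  exact key k k l (by omega) hl hc hk

-- slice = "kot" pins three characters of the word
theorem pvKotChars (cs : List Char) (a : Int) (ha : 0 ≤ a)
    (h : PySem.List.slice cs (some a) (some (a + 3)) = ['k', 'o', 't']) :
    cs[a.toNat]? = some 'k' ∧ cs[a.toNat + 1]? = some 'o' ∧ cs[a.toNat + 2]? = some 't' := by
  rw [PySem.List.slice_toNat cs ha (by omega)] at h
  have h3 : (a + 3).toNat - a.toNat = 3 := by omega
  rw [h3] at h
  refine ⟨?_, ?_, ?_⟩
  · have := congrArg (fun l => l[0]?) h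
    simpa [List.getElem?_take, List.getElem?_drop] using this
  · have := congrArg (fun l => l[1]?) h
    simpa [List.getElem?_take, List.getElem?_drop] using this
  · have := congrArg (fun l => l[2]?) h
    simpa [List.getElem?_take, List.getElem?_drop] using this

-- two "kot" occurrences are at least 3 positions apart (no overlap at distance 1 or 2)
theorem pvKotGap (cs : List Char) (a b : Int) (ha : 0 ≤ a) (hab : a < b)
    (hA : PySem.List.slice cs (some a) (some (a + 3)) = ['k', 'o', 't'])
    (hB : PySem.List.slice cs (some b) (some (b + 3)) = ['k', 'o', 't']) :
    a + 3 ≤ b := by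
  obtain ⟨hk, ho, ht⟩ := pvKotChars cs a ha hA
  obtain ⟨hk', _, _⟩ := pvKotChars cs b (by omega) hB
  rcases (by omega : b = a + 1 ∨ b = a + 2 ∨ a + 3 ≤ b) with h1 | h2 | h3
  · exfalso
    rw [h1, show (a + 1).toNat = a.toNat + 1 by omega] at hk'
    rw [ho] at hk'
    simp at hk'
  · exfalso
    rw [h2, show (a + 2).toNat = a.toNat + 2 by omega] at hk'
    rw [ht] at hk'
    simp at hk'
  · exact h3

-- the two-pointer count in gap form: with gaps ≥ 3, only the previous separator matters
theorem pvCnt_gap (S : List Int) (hS : S.Pairwise (· < ·))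
    (hG : ∀ i j : Nat, i < j → j < S.length → S.getD i 0 + 3 ≤ S.getD j 0)
    (j : Nat) (hj : j < S.length) :
    pvCnt S (S.getD j 0 - 4) =
      if 1 ≤ j ∧ S.getD j 0 - S.getD (j - 1) 0 = 3 then j - 1 else j := by
  have hub := pvCnt_iff S hS (S.getD j 0 - 4) j hj
  split_ifs with h
  · obtain ⟨hj1, hgap⟩ := h
    have hprev := pvCnt_iff S hS (S.getD j 0 - 4) (j - 1) (by omega)
    rcases (by omega : j = 1 ∨ 2 ≤ j) with h1 | h2
    · subst h1; omega
    · have hprev2 := pvCnt_iff S hS (S.getD j 0 - 4) (j - 2) (by omega)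
      have := hG (j - 2) (j - 1) (by omega) (by omega)
      omega
  · rcases (by omega : j = 0 ∨ 1 ≤ j) with h0 | h1
    · subst h0; omega
    · have hprev := pvCnt_iff S hS (S.getD j 0 - 4) (j - 1) (by omega)
      have := hG (j - 1) j (by omega) hj
      omega

-- ===== B's invariant =====
def pvBfold (S : List Int) (j : Nat) : Option Int × Int × Int :=
  (S.take j).foldl pvBUpd (none, 0, 1)

theorem pvBfold_succ (S : List Int) (j : Nat) (hj : j < S.length) :
    pvBfold S (j + 1) = pvBUpd (pvBfold S j) (S.getD j 0) := by
  rw [List.getD_eq_getElem S 0 hj]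
  simp only [pvBfold, List.take_add_one, List.getElem?_eq_getElem hj,
    Option.toList_some, List.foldl_append, List.foldl_cons, List.foldl_nil]

theorem pvBinv (S : List Int) (j : Nat) (hj : j ≤ S.length) :
    pvBfold S j = ((if j = 0 then none else some (S.getD (j - 1) 0)),
                   (if j = 0 then 0 else pvD S (j - 1)), pvD S j) := by
  induction j with
  | zero => simp [pvBfold, pvD]
  | succ j ih =>
    rw [pvBfold_succ S j hj, ih (by omega)]
    cases j with
    | zero => simp [pvBUpd, pvD]
    | succ t =>
      simp [pvBUpd, pvD]
      split_ifs <;> rfl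

-- ===== A's invariant =====
theorem pvMain (S : List Int) (hS : S.Pairwise (· < ·))
    (hG : ∀ i j : Nat, i < j → j < S.length → S.getD i 0 + 3 ≤ S.getD j 0)
    (j : Nat) (hj : j ≤ S.length) :
    (PySem.List.pyRange 1 ((j : Int) + 1) 1).foldl (pvAStep S)
        ((List.replicate (S.length + 1) 0).set 0 1, 0)
      = ((List.range (j + 1)).map (pvD S) ++ List.replicate (S.length - j) 0, pvLft S j) := by
  induction j with
  | zero =>
    rw [show (((0:Nat):Int) + 1) = 1 by norm_num, PySem.List.pyRange_one_eq_nil le_rfl]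
    simp [pvLft, pvD, List.replicate_succ, List.range_succ]
  | succ j ih =>
    have hjlt : j < S.length := hj
    have hih := ih (le_of_lt hjlt)
    rw [show (((j+1:Nat)):Int) + 1 = ((j:Int) + 1) + 1 by push_cast; ring]
    rw [PySem.List.pyRange_one_succ_right (by omega : (1:Int) ≤ (j:Int) + 1)]
    rw [List.foldl_append, hih, List.foldl_cons, List.foldl_nil]
    set M := (List.range (j + 1)).map (pvD S) with hM
    have hBlen : M.length = j + 1 := by simp [hM]
    have hMget : ∀ i : Nat, i < j + 1 → M.getD i 0 = pvD S i := by
      intro i hi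
      simp [hM, List.getD_eq_getElem?_getD, List.getElem?_map, List.getElem?_range hi]
    have hiff := pvCnt_iff S hS (S.getD j 0 - 4) j hjlt
    have hc_le : pvCnt S (S.getD j 0 - 4) ≤ j := by omega
    have hlft : pvLft S j ≤ pvCnt S (S.getD j 0 - 4) := by
      rcases Nat.eq_zero_or_pos j with h0 | hpos
      · simp [pvLft, h0]
      · rw [pvLft, if_neg (by omega)]
        apply pvCnt_mono
        have hgl := List.pairwise_iff_getElem.mp hS (j-1) j (by omega) hjlt (by omega)
        rw [List.getD_eq_getElem S 0 (by omega), List.getD_eq_getElem S 0 hjlt]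
        omega
    have hAdv := pvAdvA_eq S hS (S.getD j 0 - 4) (j+1) (pvLft S j) hlft (by omega) (by omega)
    simp only [pvAStep]
    rw [show ((j:Int) + 1 - 1) = (j:Int) by ring]
    rw [show ((j:Int) + 1).toNat = j + 1 by omega]
    rw [show ((j:Int) + 1) = ((j + 1 : Nat) : Int) by push_cast; ring]
    simp only [PySem.List.pyGetD_natCast]
    rw [hAdv]
    have hgj : ∀ i : Nat, i < j + 1 →
        (M ++ List.replicate (S.length - j) 0).getD i 0 = M.getD i 0 := by
      intro i hi
      have hi' : i < M.length := by omega
      simp [List.getD_eq_getElem?_getD, List.getElem?_append_left hi']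
    rw [hgj j (by omega), hMget j (by omega)]
    set c := pvCnt S (S.getD j 0 - 4) with hc
    set dpold := M ++ List.replicate (S.length - j) 0 with hdp
    have hdplen : dpold.length = S.length + 1 := by
      rw [hdp, List.length_append, hBlen, List.length_replicate]
      omega
    have hg1 : (dpold.set (j + 1) (pvD S j)).getD (j + 1) 0 = pvD S j := by
      rw [List.getD_eq_getElem?_getD, List.getElem?_set_self (by omega : j + 1 < dpold.length)]
      rfl
    have hg2 : (dpold.set (j + 1) (pvD S j)).getD c 0 = pvD S c := by
      rw [List.getD_eq_getElem?_getD, List.getElem?_set_ne (by omega : j + 1 ≠ c),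
        ← List.getD_eq_getElem?_getD, hdp, hgj c (by omega), hMget c (by omega)]
    rw [hg1, hg2, List.set_set]
    have hcgap := pvCnt_gap S hS hG j hjlt
    have hval : PySem.Int.mod (pvD S j + pvD S c) pvMOD = pvD S (j + 1) := by
      cases j with
      | zero =>
        have hc0 : c = 0 := by rw [hc, hcgap]; simp
        rw [hc0]
        simp [pvD]
      | succ t =>
        by_cases hg : S.getD (t + 1) 0 - S.getD t 0 = 3
        · have hct : c = t := by
            rw [hc, hcgap]
            simp only [Nat.add_sub_cancel]
            rw [if_pos ⟨by omega, hg⟩]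
          rw [hct, show t + 1 + 1 = t + 2 from rfl, pvD_eq2, if_pos hg]
        · have hct : c = t + 1 := by
            rw [hc, hcgap]
            simp only [Nat.add_sub_cancel]
            rw [if_neg (fun h => hg h.2)]
          rw [hct, show t + 1 + 1 = t + 2 from rfl, pvD_eq2, if_neg hg]
    rw [hval]
    have hlf1 : pvLft S (j + 1) = c := by
      rw [pvLft, if_neg (Nat.succ_ne_zero j)]
      simp only [Nat.add_sub_cancel]
      rw [← hc]
    rw [hlf1, hdp, List.set_append_right _ _ (by omega : M.length ≤ j + 1), hBlen]
    rw [show S.length - j = (S.length - (j + 1)) + 1 by omega, List.replicate_succ]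
    have hMsucc : (List.range (j + 1 + 1)).map (pvD S) = M ++ [pvD S (j + 1)] := by
      rw [hM, List.range_succ, List.map_append]
      rfl
    simp [hMsucc, List.set_cons_zero, List.append_assoc]

-- ===== VERDICT helpers =====
theorem pvGapAll (cs : List Char) (S : List Int)
    (hSdef : S = (PySem.List.pyRange 1 ((cs.length : Int) - 3) 1).filter
      (fun i => decide (PySem.List.slice cs (some i) (some (i + 3)) = ['k', 'o', 't']))) :
    ∀ i j : Nat, i < j → j < S.length → S.getD i 0 + 3 ≤ S.getD j 0 := by
  intro i j hij hj
  have hi : i < S.length := by omega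
  have hmi : S.getD i 0 ∈ S := by
    rw [List.getD_eq_getElem S 0 hi]; exact List.getElem_mem hi
  have hmj : S.getD j 0 ∈ S := by
    rw [List.getD_eq_getElem S 0 hj]; exact List.getElem_mem hj
  have hlt : S.getD i 0 < S.getD j 0 := by
    have hS : S.Pairwise (· < ·) := by
      rw [hSdef]
      exact List.Pairwise.sublist List.filter_sublist (PySem.List.pairwise_lt_pyRange_one 1 _)
    have := List.pairwise_iff_getElem.mp hS i j hi hj hij
    rw [List.getD_eq_getElem S 0 hi, List.getD_eq_getElem S 0 hj]
    exact this
  have hmem : ∀ x : Int, x ∈ S →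
      1 ≤ x ∧ PySem.List.slice cs (some x) (some (x + 3)) = ['k', 'o', 't'] := by
    intro x hx
    rw [hSdef] at hx
    obtain ⟨hr, hp⟩ := List.mem_filter.mp hx
    exact ⟨(PySem.List.mem_pyRange_one.mp hr).1, of_decide_eq_true hp⟩
  obtain ⟨hbi, hpi⟩ := hmem _ hmi
  obtain ⟨_, hpj⟩ := hmem _ hmj
  exact pvKotGap cs (S.getD i 0) (S.getD j 0) (by omega) hlt hpi hpj

-- ===== VERDICT (by name: the statement is the Claim_ definition above) =====
theorem count_konkotenations_spec : Claim_equal_count_konkotenations := by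
  intro word _dom
  simp only [Spec_count_konkotenations, count_konkotenations, count_konkotenations_alt,
    PySem.List.foldl_append_ite, List.map_id', List.nil_append]
  rw [pvFoldlIfFilter
    (fun i => PySem.List.slice word.toList (some i) (some (i + 3)) = ['k', 'o', 't']) pvBUpd]
  set cs := word.toList
  set S : List Int :=
    (PySem.List.pyRange 1 ((cs.length : Int) - 3) 1).filter
      (fun i => decide (PySem.List.slice cs (some i) (some (i + 3)) = ['k', 'o', 't'])) with hSdef
  have hS : S.Pairwise (· < ·) :=
    List.Pairwise.sublist List.filter_sublist (PySem.List.pairwise_lt_pyRange_one 1 _)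
  have hG := pvGapAll cs S hSdef
  rw [pvMain S hS hG S.length le_rfl]
  have hB : S.foldl pvBUpd (none, 0, 1) = pvBfold S S.length := by
    rw [pvBfold, List.take_length]
  rw [hB, pvBinv S S.length le_rfl]
  simp only [Nat.sub_self, List.replicate_zero, List.append_nil]
  rw [PySem.List.pyGetD_natCast]
  simp [List.getD_eq_getElem?_getD]
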